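-- pv_equiv track=rewrite | github.com/taeyeon357/Algorithm | 프로그래머스/1/134240. 푸드 파이트 대회/푸드 파이트 대회.py | solution
-- ===== SOURCE A (Python) =====
-- def solution(food):
--     answer = ''
--
--     for i in range(1,len(food)):
--         for j in range(food[i]//2):
--             answer += str(i)
--
--     answer += '0'
--
--     for i in range(len(food)-1, 0, -1):
--         for j in range(food[i]//2):
--             answer += str(i)
--
--     return answer
-- ===== SOURCE B (Python) =====
-- def solution(food):
--     parts = ['0']
--     for i in range(len(food) - 1, 0, -1):
--         half = str(i) * (food[i] // 2)
--         parts.insert(0, half)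
--         parts.append(half)
--     return ''.join(parts)
-- ===== Notes on version B (the rewrite author's own statement) =====
-- stated objective: simpler
-- what changed: B builds the palindrome inside-out: starting from the block list ['0'] it wraps each index's half-block onto both ends in a single descending loop and joins once, instead of A's two sequential nested per-character appending passes.
import Mathlib
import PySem

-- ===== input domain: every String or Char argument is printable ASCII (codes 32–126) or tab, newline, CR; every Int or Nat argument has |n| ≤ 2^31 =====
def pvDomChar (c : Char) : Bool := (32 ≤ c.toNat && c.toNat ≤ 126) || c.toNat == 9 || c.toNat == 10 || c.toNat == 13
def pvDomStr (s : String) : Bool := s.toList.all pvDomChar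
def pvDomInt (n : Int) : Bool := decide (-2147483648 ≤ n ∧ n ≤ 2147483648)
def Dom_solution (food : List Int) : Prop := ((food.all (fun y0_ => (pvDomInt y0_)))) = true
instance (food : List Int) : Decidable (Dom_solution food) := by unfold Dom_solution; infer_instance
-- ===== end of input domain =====

-- B builds the palindrome inside-out: one descending loop wraps each half-block onto both
-- ends of a block list seeded with '0', then joins once (objective: simpler).

-- ===== PORT A =====
-- A: two nested loops appending str(i) char by char; strings ported as List Char (PySem convention).
def solution (food : List Int) : String :=
  let n : Int := food.length
  let a1 : List Char :=
    (PySem.List.pyRange 1 n 1).foldl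
      (fun ans i =>
        (PySem.List.pyRange 0 (PySem.Int.floordiv (PySem.List.pyGetD food i 0) 2) 1).foldl
          (fun a _ => a ++ PySem.Int.toChars i) ans) []
  let a2 : List Char := a1 ++ ['0']
  let a3 : List Char :=
    (PySem.List.pyRange (n - 1) 0 (-1)).foldl
      (fun ans i =>
        (PySem.List.pyRange 0 (PySem.Int.floordiv (PySem.List.pyGetD food i 0) 2) 1).foldl
          (fun a _ => a ++ PySem.Int.toChars i) ans) a2
  String.ofList a3

-- ===== PORT B =====
-- B: block list seeded with ['0']; each step inserts half at the front and appends it at the back.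
def solution_alt (food : List Int) : String :=
  let parts : List (List Char) :=
    (PySem.List.pyRange ((food.length : Int) - 1) 0 (-1)).foldl
      (fun parts i =>
        let half := PySem.List.pyRepeat (PySem.Int.toChars i)
                      (PySem.Int.floordiv (PySem.List.pyGetD food i 0) 2)
        (half :: parts) ++ [half]) [['0']]
  String.ofList (PySem.Chars.join [] parts)

-- ===== PRECONDITION & SPEC =====
def Spec_solution (food : List Int) (out : String) : Prop := out = solution_alt food
instance (food : List Int) (out : String) : Decidable (Spec_solution food out) := by unfold Spec_solution; infer_instance

-- ===== CLAIM =====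
def Claim_equal_solution : Prop := ∀ (food : List Int), Dom_solution food → Spec_solution food (solution food)

-- ===== LEMMAS AND PROOFS =====

-- A fold that appends a fixed chunk once per list element only counts the elements.
theorem foldl_const_append (c : List Char) :
    ∀ (l : List Int) (ans : List Char),
      l.foldl (fun a _ => a ++ c) ans = ans ++ (List.replicate l.length c).flatten
  | [], ans => by simp
  | _ :: t, ans => by
      simp [List.foldl_cons, foldl_const_append c t, List.replicate_succ]

-- The inner Python loop 'for j in range(food[i]//2): answer += str(i)' is str(i) * (food[i]//2).
theorem inner_loop_eq (m : Int) (c ans : List Char) :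
    (PySem.List.pyRange 0 m 1).foldl (fun a _ => a ++ c) ans = ans ++ PySem.List.pyRepeat c m := by
  rw [foldl_const_append]
  have hrep : PySem.List.pyRepeat c m = (List.replicate m.toNat c).flatten := by
    simp [PySem.List.pyRepeat]
  have hlen : (PySem.List.pyRange 0 m 1).length = m.toNat := by
    simp [PySem.List.length_pyRange_one]
  rw [hlen, hrep]

-- A's loop body, rewritten as appending one whole block per index.
theorem loop_body_eq (food : List Int) (l : List Int) (init : List Char) :
    l.foldl (fun ans i =>
        (PySem.List.pyRange 0 (PySem.Int.floordiv (PySem.List.pyGetD food i 0) 2) 1).foldl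
          (fun a _ => a ++ PySem.Int.toChars i) ans) init
      = init ++ (l.map (fun i => PySem.List.pyRepeat (PySem.Int.toChars i)
                  (PySem.Int.floordiv (PySem.List.pyGetD food i 0) 2))).flatten := by
  induction l generalizing init with
  | nil => simp
  | cons x t ih =>
      rw [List.foldl_cons, inner_loop_eq, ih]
      simp [List.flatten_cons]

-- ''.join with empty separator is flatten.
theorem join_empty_sep : ∀ (l : List (List Char)), PySem.Chars.join [] l = l.flatten
  | [] => rfl
  | [x] => by simp [PySem.Chars.join, List.intercalate]
  | x :: y :: t => by
      have ih := join_empty_sep (y :: t)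
      simp only [PySem.Chars.join, List.intercalate, List.intersperse] at ih ⊢
      simp only [List.flatten_cons] at ih ⊢
      simp [ih]

-- B's wrapping fold: flanks the seed by the blocks of the reversed list on the left
-- and the blocks of the list itself on the right.
theorem wrap_fold_eq (f : Int → List Char) :
    ∀ (l : List Int) (init : List (List Char)),
      l.foldl (fun p i => (f i :: p) ++ [f i]) init
        = l.reverse.map f ++ init ++ l.map f
  | [], init => by simp
  | x :: t, init => by
      rw [List.foldl_cons, wrap_fold_eq f t]
      simp

-- ===== VERDICT =====
theorem solution_spec : Claim_equal_solution := by
  intro food _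
  unfold Spec_solution solution solution_alt
  dsimp only
  rw [loop_body_eq food, loop_body_eq food, wrap_fold_eq, join_empty_sep]
  have hrev : PySem.List.pyRange ((food.length : Int) - 1) 0 (-1)
      = (PySem.List.pyRange 1 (food.length : Int) 1).reverse := by
    rw [PySem.List.pyRange_neg_one_eq_reverse]
    norm_num
  rw [hrev]
  simp [List.map_reverse, List.append_assoc]
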